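-- pv_equiv track=rewrite | github.com/Niteshkrjhag/POTD-Problem-of-the-Day-LeetCode-GFG- | GFG/Count_X_in_Range_of_a_Sorted_Array.py | countXInRange
-- ===== SOURCE A (Python) =====
-- def countXInRange(arr, queries):
--
--     # Map each distinct element to its continuous index range [start, end]
--     value_to_range = {}
--
--     start_index = 0
--     previous_value = arr[0]
--
--     # Build ranges for each value (array is assumed sorted)
--     for index, value in enumerate(arr):
--
--         # If value continues, do nothing
--         if value == previous_value:
--             continue
--
--         # Close range for previous value
--         end_index = index - 1
--         value_to_range[previous_value] = [start_index, end_index]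
--
--         # Start new range
--         start_index = index
--         previous_value = value
--
--     # Close range for last value
--     value_to_range[previous_value] = [start_index, index]
--
--     results = []
--
--     # Process each query
--     for left, right, target in queries:
--
--         # If target exists in array
--         if target in value_to_range:
--             range_start, range_end = value_to_range[target]
--
--             # Compute overlap of [left, right] with target range
--             count = min(right, range_end) - max(left, range_start) + 1
--
--             # If overlap is valid
--             results.append(count if count > 0 else 0)
--         else:
--             results.append(0)
--
--     return results
-- ===== SOURCE B (Python) =====
-- def countXInRange(arr, queries):
--     # Per-query backward scan: find the last occurrence of target, extend left to
--     # the start of its run; no precomputed dictionary.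
--     n = len(arr)
--     results = []
--     for left, right, target in queries:
--         i = n - 1
--         while i >= 0 and arr[i] != target:
--             i -= 1
--         if i < 0:
--             results.append(0)
--             continue
--         j = i
--         while j > 0 and arr[j - 1] == target:
--             j -= 1
--         count = min(right, i) - max(left, j) + 1
--         results.append(count if count > 0 else 0)
--     return results
-- ===== Notes on version B (the rewrite author's own statement) =====
-- stated objective: alternative
-- what changed: B drops A's precomputed value-to-run dictionary entirely and answers each query by a backward scan that finds the last occurrence of the target and extends left to the start of that run, then clamps the overlap with [left,right].
import Mathlib
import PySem

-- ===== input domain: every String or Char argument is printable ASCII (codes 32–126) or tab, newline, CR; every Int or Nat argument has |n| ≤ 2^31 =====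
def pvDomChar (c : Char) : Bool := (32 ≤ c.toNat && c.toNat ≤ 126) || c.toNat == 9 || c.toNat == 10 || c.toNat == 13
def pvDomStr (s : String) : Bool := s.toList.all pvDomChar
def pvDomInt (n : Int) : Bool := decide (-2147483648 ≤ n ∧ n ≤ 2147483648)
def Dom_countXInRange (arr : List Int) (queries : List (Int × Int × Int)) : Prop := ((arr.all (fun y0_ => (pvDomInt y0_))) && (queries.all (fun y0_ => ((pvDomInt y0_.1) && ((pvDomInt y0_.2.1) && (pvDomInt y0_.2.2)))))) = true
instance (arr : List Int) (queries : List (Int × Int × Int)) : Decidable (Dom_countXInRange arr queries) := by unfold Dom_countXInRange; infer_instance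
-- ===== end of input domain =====

-- B replaces A's precomputed value→run dictionary by a per-query backward scan
-- (find the last occurrence of target, extend left to the run start); an
-- alternative decomposition, not claimed faster.

-- ===== PORT A =====
-- the 'for index, value in enumerate(arr)' loop, carrying (start_index, previous_value, dict)
def countLoop (l : List Int) (k : Nat) (s : Nat) (p : Int)
    (d : PySem.Dict Int (Nat × Nat)) : Nat × Int × PySem.Dict Int (Nat × Nat) :=
  match l with
  | [] => (s, p, d)
  | v :: rest =>
      if v == p then countLoop rest (k + 1) s p d
      else countLoop rest (k + 1) k v (d.insert p (s, k - 1))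

def countXInRange (arr : List Int) (queries : List (Int × Int × Int)) : List Int :=
  -- previous_value = arr[0] raises on empty arr: Pre_ excludes it; getD 0 is a dummy there
  let st := countLoop arr 0 0 (arr.getD 0 0) PySem.Dict.empty
  -- close range for last value: after the loop index = len(arr) - 1
  let d := st.2.2.insert st.2.1 (st.1, arr.length - 1)
  queries.foldl (fun results q =>
    match d.get? q.2.2 with
    | some r =>
        let count := min q.2.1 ((r.2 : Int)) - max q.1 ((r.1 : Int)) + 1
        results ++ [if count > 0 then count else 0]
    | none => results ++ [0]) []

-- ===== PORT B =====
-- 'i = n-1; while i >= 0 and arr[i] != target: i -= 1'  (argument = i+1; 0 = i has gone below 0)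
def scanDown (arr : List Int) (t : Int) : Nat → Option Nat
  | 0 => none
  | k + 1 => if arr.getD k 0 == t then some k else scanDown arr t k

-- 'j = i; while j > 0 and arr[j-1] == target: j -= 1'
def extendLeft (arr : List Int) (t : Int) : Nat → Nat
  | 0 => 0
  | j + 1 => if arr.getD j 0 == t then extendLeft arr t j else j + 1

def countXInRange_alt (arr : List Int) (queries : List (Int × Int × Int)) : List Int :=
  queries.foldl (fun results q =>
    match scanDown arr q.2.2 arr.length with
    | none => results ++ [0]
    | some i =>
        let j := extendLeft arr q.2.2 i
        let count := min q.2.1 ((i : Int)) - max q.1 ((j : Int)) + 1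
        results ++ [if count > 0 then count else 0]) []

-- ===== PRECONDITION & SPEC =====
-- A reads arr[0] before its loop, so it raises IndexError exactly when arr is empty.
def Pre_countXInRange (arr : List Int) (queries : List (Int × Int × Int)) : Prop := arr ≠ []
instance (arr : List Int) (queries : List (Int × Int × Int)) : Decidable (Pre_countXInRange arr queries) := by unfold Pre_countXInRange; infer_instance
def pvWitness_countXInRange : List Int × (List (Int × Int × Int)) := ([1], [(0, 0, 1)])

def Spec_countXInRange (arr : List Int) (queries : List (Int × Int × Int)) (out : List Int) : Prop := out = countXInRange_alt arr queries
instance (arr : List Int) (queries : List (Int × Int × Int)) (out : List Int) : Decidable (Spec_countXInRange arr queries out) := by unfold Spec_countXInRange; infer_instance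

-- ===== CLAIM (what is proved, stated in full; the proofs are below) =====
def Claim_equal_countXInRange : Prop := ∀ (arr : List Int) (queries : List (Int × Int × Int)), Dom_countXInRange arr queries → Pre_countXInRange arr queries → Spec_countXInRange arr queries (countXInRange arr queries)

-- ===== LEMMAS AND PROOFS =====

-- What A's loop contributes to a lookup of t in the final dict: the last run of t,
-- threaded exactly like A's state (current run start s at offset k, current value p).
def lastRunSpec (t : Int) : List Int → Nat → Nat → Int → Option (Nat × Nat) → Option (Nat × Nat)
  | [], k, s, p, acc => if p = t then some (s, k - 1) else acc
  | v :: rest, k, s, p, acc =>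
      if v = p then lastRunSpec t rest (k + 1) s p acc
      else lastRunSpec t rest (k + 1) k v (if p = t then some (s, k - 1) else acc)

theorem countLoop_get? (t : Int) : ∀ (l : List Int) (k s : Nat) (p : Int)
    (d : PySem.Dict Int (Nat × Nat)),
    ((countLoop l k s p d).2.2.insert (countLoop l k s p d).2.1
      ((countLoop l k s p d).1, k + l.length - 1)).get? t
      = lastRunSpec t l k s p (d.get? t) := by
  intro l
  induction l with
  | nil =>
      intro k s p d
      simp [countLoop, lastRunSpec, PySem.Dict.get?_insert, eq_comm]
  | cons v rest ih =>
      intro k s p d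
      by_cases h : v = p
      · simp only [countLoop, lastRunSpec, h, BEq.rfl, if_true]
        have := ih (k + 1) s p d
        simpa [Nat.add_assoc, Nat.add_comm, Nat.add_left_comm] using this
      · simp only [countLoop, lastRunSpec, h, if_false, beq_iff_eq]
        have := ih (k + 1) k v (d.insert p (s, k - 1))
        rw [show k + (v :: rest).length - 1 = k + 1 + rest.length - 1 by simp]
        rw [this, PySem.Dict.get?_insert]
        have harr : (if t = p then some (s, k - 1) else d.get? t)
             = (if p = t then some (s, k - 1) else d.get? t) := by
          by_cases ht : t = p
          · subst ht; simp
          · rw [if_neg ht, if_neg (fun h => ht h.symm)]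
        rw [harr]

theorem scanDown_none (arr : List Int) (t : Int) :
    ∀ n, scanDown arr t n = none ↔ ∀ m, m < n → arr.getD m 0 ≠ t := by
  intro n
  induction n with
  | zero => simp [scanDown]
  | succ k ih =>
      constructor
      · intro h m hm
        simp only [scanDown] at h
        split at h
        · exact absurd h (by simp)
        · rename_i hne
          rcases Nat.lt_succ_iff_lt_or_eq.1 hm with hm' | hm'
          · exact (ih.1 h) m hm'
          · subst hm'; simpa using hne
      · intro h
        simp only [scanDown]
        have := h k (Nat.lt_succ_self k)
        rw [if_neg (by simpa using this)]
        exact ih.2 (fun m hm => h m (Nat.lt_succ_of_lt hm))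

theorem scanDown_some (arr : List Int) (t : Int) :
    ∀ n e, scanDown arr t n = some e →
      arr.getD e 0 = t ∧ e < n ∧ ∀ m, e < m → m < n → arr.getD m 0 ≠ t := by
  intro n
  induction n with
  | zero => intro e h; simp [scanDown] at h
  | succ k ih =>
      intro e h
      simp only [scanDown] at h
      split at h
      · rename_i heq
        cases h
        exact ⟨by simpa using heq, Nat.lt_succ_self _, by omega⟩
      · rename_i hne
        obtain ⟨h1, h2, h3⟩ := ih e h
        refine ⟨h1, Nat.lt_succ_of_lt h2, ?_⟩
        intro m hm hm'
        rcases Nat.lt_succ_iff_lt_or_eq.1 hm' with hm'' | hm''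
        · exact h3 m hm hm''
        · subst hm''; simpa using hne

theorem extendLeft_run (arr : List Int) (t : Int) (s : Nat)
    (hs : s = 0 ∨ arr.getD (s - 1) 0 ≠ t) :
    ∀ j, s ≤ j → (∀ m, s ≤ m → m < j → arr.getD m 0 = t) → extendLeft arr t j = s := by
  intro j
  induction j with
  | zero => intro h _; simp [extendLeft]; omega
  | succ j' ih =>
      intro hle hrun
      simp only [extendLeft]
      by_cases hcase : s = j' + 1
      · subst hcase
        rw [if_neg]
        rcases hs with h0 | hne
        · omega
        · simpa using hne
      · have hsj : s ≤ j' := by omega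
        rw [if_pos (by simpa using hrun j' hsj (Nat.lt_succ_self _))]
        exact ih hsj (fun m hm hm' => hrun m hm (Nat.lt_succ_of_lt hm'))

-- the main invariant: A's run-tracking state computes B's backward-scan result
theorem lastRunSpec_eq (arr : List Int) (t : Int) :
    ∀ (l : List Int) (k s : Nat) (p : Int) (acc : Option (Nat × Nat)),
    l = arr.drop k → 0 < k → k ≤ arr.length → s < k →
    (∀ m, s ≤ m → m < k → arr.getD m 0 = p) →
    (s = 0 ∨ arr.getD (s - 1) 0 ≠ p) →
    lastRunSpec t l k s p acc =
      (scanDown arr t arr.length).elim acc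
        (fun e => if s ≤ e then some (extendLeft arr t e, e) else acc) := by
  intro l
  induction l with
  | nil =>
      intro k s p acc hdrop hk0 hkn hsk hrun hs
      have hkeq : k = arr.length := by
        have := List.drop_eq_nil_iff.1 hdrop.symm
        omega
      simp only [lastRunSpec]
      by_cases hpt : p = t
      · subst hpt
        have hlast : arr.getD (arr.length - 1) 0 = p := hrun _ (by omega) (by omega)
        have hscan : scanDown arr p arr.length = some (arr.length - 1) := by
          have hn1 : arr.length = (arr.length - 1) + 1 := by omega
          conv_lhs => rw [hn1]
          have hb : (arr.getD (arr.length - 1) 0 == p) = true := by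
            rw [beq_iff_eq]; exact hlast
          simp only [scanDown, hb, if_true]
        rw [if_pos rfl, hscan]
        simp only [Option.elim]
        rw [if_pos (by omega)]
        rw [extendLeft_run arr p s hs (arr.length - 1) (by omega)
          (fun m hm hm' => hrun m hm (by omega))]
        simp [hkeq]
      · rw [if_neg hpt]
        cases hsc : scanDown arr t arr.length with
        | none => rfl
        | some e =>
            obtain ⟨he1, he2, -⟩ := scanDown_some arr t _ _ hsc
            simp only [Option.elim]
            rw [if_neg (fun hse => hpt ((hrun e hse (by omega)).symm.trans he1))]
  | cons v rest ih =>
      intro k s p acc hdrop hk0 hkn hsk hrun hs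
      have hklt : k < arr.length := by
        by_contra h
        rw [List.drop_eq_nil_iff.2 (by omega)] at hdrop
        simp at hdrop
      have hv : arr.getD k 0 = v := by
        have h1 : arr.getD k 0 = (arr.drop k).getD 0 0 := by
          rw [List.getD_eq_getElem?_getD, List.getD_eq_getElem?_getD,
              List.getElem?_drop]
          simp
        rw [h1, ← hdrop]; rfl
      have hrest : rest = arr.drop (k + 1) := by
        have h2 := congrArg List.tail hdrop
        rw [List.tail_drop] at h2
        simpa using h2
      simp only [lastRunSpec]
      by_cases hvp : v = p
      · rw [if_pos hvp]
        exact ih (k + 1) s p acc hrest (by omega) (by omega) (by omega)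
          (fun m hm hm' => by
            rcases Nat.lt_succ_iff_lt_or_eq.1 hm' with h | h
            · exact hrun m hm h
            · subst h; rw [hv, hvp]) hs
      · rw [if_neg hvp]
        have hkm1 : arr.getD (k - 1) 0 = p := hrun (k - 1) (by omega) (by omega)
        rw [ih (k + 1) k v _ hrest (by omega) (by omega) (by omega)
          (fun m hm hm' => by
            have : m = k := by omega
            subst this; exact hv)
          (Or.inr (by rw [hkm1]; exact fun h => hvp h.symm))]
        cases hsc : scanDown arr t arr.length with
        | none =>
            have hall := (scanDown_none arr t _).1 hsc
            have hpt : p ≠ t := by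
              intro h; exact hall (k - 1) (by omega) (by rw [hkm1, h])
            simp [Option.elim, hpt]
        | some e =>
            obtain ⟨he1, he2, he3⟩ := scanDown_some arr t _ _ hsc
            simp only [Option.elim]
            by_cases hke : k ≤ e
            · rw [if_pos hke, if_pos (by omega)]
            · rw [if_neg hke]
              by_cases hpt : p = t
              · -- last occurrence is exactly k-1, the end of the current run
                have hek : e = k - 1 := by
                  by_contra hne
                  exact he3 (k - 1) (by omega) (by omega) (by rw [hkm1, hpt])
                rw [if_pos hpt, if_pos (by omega)]
                rw [extendLeft_run arr t s (by rwa [hpt] at hs) e (by omega)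
                  (fun m hm hm' => by rw [hrun m hm (by omega), hpt])]
                rw [hek]
              · have hes : ¬ s ≤ e := by
                  intro hse
                  exact hpt ((hrun e hse (by omega)).symm.trans he1)
                rw [if_neg hpt, if_neg hes]

-- A's final dictionary lookup = B's backward scan, for nonempty arr
theorem lookup_eq (arr : List Int) (hne : arr ≠ []) (t : Int) :
    (let st := countLoop arr 0 0 (arr.getD 0 0) PySem.Dict.empty
     (st.2.2.insert st.2.1 (st.1, arr.length - 1)).get? t)
    = (scanDown arr t arr.length).elim none
        (fun e => some (extendLeft arr t e, e)) := by
  obtain ⟨a, l, rfl⟩ : ∃ a l, arr = a :: l := by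
    cases arr with
    | nil => exact absurd rfl hne
    | cons a l => exact ⟨a, l, rfl⟩
  have h1 := countLoop_get? t (a :: l) 0 0 (List.getD (a :: l) 0 0) PySem.Dict.empty
  simp only [List.length_cons, Nat.zero_add] at h1 ⊢
  rw [h1]
  have hget0 : List.getD (a :: l) 0 0 = a := rfl
  rw [hget0]
  rw [show lastRunSpec t (a :: l) 0 0 a (PySem.Dict.empty.get? t)
        = lastRunSpec t l 1 0 a (PySem.Dict.empty.get? t) by
      simp [lastRunSpec]]
  rw [lastRunSpec_eq (a :: l) t l 1 0 a _ rfl (by omega) (by simp) (by omega)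
    (fun m hm hm' => by interval_cases m; rfl) (Or.inl rfl)]
  have hacc : (PySem.Dict.empty : PySem.Dict Int (Nat × Nat)).get? t = none := rfl
  rw [hacc]
  simp only [List.length_cons]
  cases hsc : scanDown (a :: l) t (l.length + 1) <;> simp [Option.elim]

-- ===== VERDICT (by name: the statement is the Claim_ definition above) =====
theorem countXInRange_spec : Claim_equal_countXInRange := by
  intro arr queries hdom hpre
  have hne : arr ≠ [] := hpre
  clear hdom hpre
  unfold Spec_countXInRange countXInRange countXInRange_alt
  induction queries using List.reverseRecOn with
  | nil => rfl
  | append_singleton qs q ih =>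
      rw [List.foldl_append, List.foldl_append, ← ih]
      simp only [List.foldl_cons, List.foldl_nil]
      rw [lookup_eq arr hne q.2.2]
      cases scanDown arr q.2.2 arr.length with
      | none => rfl
      | some e => rfl
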